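-- pv_equiv track=rewrite | github.com/ErikHeller/ki-coding-challenge | 5_Gewinnt_alpha_beta_array_flip.py | findlastvalues
-- ===== SOURCE A (Python) =====
-- def findlastvalues(state):
--     a, b = 0, 0
--     last_e = last_element(state)
--     color = last_e % 2
--     for i in range(last_e):
--         if state[last_e - i] != -1 and (last_e - i) % 2 == color and state[last_e - i] != 13:
--             a = last_e - i
--             break
--     for i in range(last_e):
--         if state[last_e - i] != -1 and (last_e - i) % 2 != color and state[last_e - i] != 13:
--             b = last_e - i
--             break
--     return a, b
--
-- def last_element(state):
--     for i in range(len(state)):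
--         if state[i] == 0:
--             return i - 1
--     return len(state) - 1
-- ===== SOURCE B (Python) =====
-- def findlastvalues(state):
--     last_e = next((i - 1 for i, v in enumerate(state) if v == 0), len(state) - 1)
--     color = last_e % 2
--     a = b = 0
--     for j in range(last_e, 0, -1):
--         v = state[j]
--         if v == -1 or v == 13:
--             continue
--         if j % 2 == color:
--             if a == 0:
--                 a = j
--         elif b == 0:
--             b = j
--         if a != 0 and b != 0:
--             break
--     return a, b
-- ===== Notes on version B (the rewrite author's own statement) =====
-- stated objective: alternative
-- what changed: Replaces A's two separate top-down scans (one per parity) by a single backward pass over indices last_e..1 that latches both parities' first valid index and breaks when both are found; last_e is computed with next/enumerate instead of an index loop.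
import Mathlib
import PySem

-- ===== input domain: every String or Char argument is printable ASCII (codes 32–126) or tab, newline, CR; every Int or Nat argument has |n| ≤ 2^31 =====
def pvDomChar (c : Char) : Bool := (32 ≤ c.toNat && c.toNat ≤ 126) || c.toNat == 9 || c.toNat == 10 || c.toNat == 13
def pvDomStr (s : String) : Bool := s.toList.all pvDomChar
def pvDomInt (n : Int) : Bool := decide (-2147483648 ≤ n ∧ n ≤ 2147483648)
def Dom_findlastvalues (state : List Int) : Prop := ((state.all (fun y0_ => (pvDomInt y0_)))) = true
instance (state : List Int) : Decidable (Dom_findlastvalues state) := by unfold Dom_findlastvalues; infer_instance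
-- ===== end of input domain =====

-- B merges A's two separate parity scans into one backward pass latching both results (objective: alternative decomposition, same cost).

-- ===== PORT A =====
-- last_element: for i in range(len(state)): if state[i]==0 return i-1; return len-1
def pvLastElemGoA (state : List Int) (i : Nat) : Int :=
  if h : i < state.length then
    if state[i] = 0 then (i : Int) - 1 else pvLastElemGoA state (i + 1)
  else (state.length : Int) - 1
termination_by state.length - i

def pvLastElementA (state : List Int) : Int := pvLastElemGoA state 0

-- first for-loop of A: for i in range(last_e): if state[last_e-i] != -1 and (last_e-i) % 2 == color and state[last_e-i] != 13: a = last_e - i; break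
-- (the index last_e - i is always in range on reachable inputs, so the default of pyGetD is never used)
def pvLoopA1 (state : List Int) (last_e color : Int) : List Int → Int
  | [] => 0
  | i :: rest =>
    if PySem.List.pyGetD state (last_e - i) 0 ≠ -1 ∧ PySem.Int.mod (last_e - i) 2 = color ∧
        PySem.List.pyGetD state (last_e - i) 0 ≠ 13 then last_e - i
    else pvLoopA1 state last_e color rest

-- second for-loop of A (parity different from color)
def pvLoopA2 (state : List Int) (last_e color : Int) : List Int → Int
  | [] => 0
  | i :: rest =>
    if PySem.List.pyGetD state (last_e - i) 0 ≠ -1 ∧ PySem.Int.mod (last_e - i) 2 ≠ color ∧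
        PySem.List.pyGetD state (last_e - i) 0 ≠ 13 then last_e - i
    else pvLoopA2 state last_e color rest

def findlastvalues (state : List Int) : Int × Int :=
  let last_e := pvLastElementA state
  let color := PySem.Int.mod last_e 2
  let a := pvLoopA1 state last_e color (PySem.List.pyRange 0 last_e 1)
  let b := pvLoopA2 state last_e color (PySem.List.pyRange 0 last_e 1)
  (a, b)

-- ===== PORT B =====
-- last_e = next((i - 1 for i, v in enumerate(state) if v == 0), len(state) - 1)
def pvLastElementB (state : List Int) : Int :=
  match (PySem.List.enumerate state 0).find? (fun p => p.2 == 0) with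
  | some p => p.1 - 1
  | none => (state.length : Int) - 1

-- single backward loop of B over j in range(last_e, 0, -1), with break once both are set
def pvLoopB (state : List Int) (color : Int) : Int → Int → List Int → Int × Int
  | a, b, [] => (a, b)
  | a, b, j :: rest =>
    let v := PySem.List.pyGetD state j 0
    if v = -1 ∨ v = 13 then pvLoopB state color a b rest
    else if PySem.Int.mod j 2 = color then
      let a' := if a = 0 then j else a
      if a' ≠ 0 ∧ b ≠ 0 then (a', b) else pvLoopB state color a' b rest
    else
      let b' := if b = 0 then j else b
      if a ≠ 0 ∧ b' ≠ 0 then (a, b') else pvLoopB state color a b' rest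

def findlastvalues_alt (state : List Int) : Int × Int :=
  let last_e := pvLastElementB state
  let color := PySem.Int.mod last_e 2
  pvLoopB state color 0 0 (PySem.List.pyRange last_e 0 (-1))

-- ===== PRECONDITION & SPEC =====
def Spec_findlastvalues (state : List Int) (out : Int × Int) : Prop := out = findlastvalues_alt state
instance (state : List Int) (out : Int × Int) : Decidable (Spec_findlastvalues state out) := by unfold Spec_findlastvalues; infer_instance

-- ===== CLAIM (what is proved, stated in full; the proofs are below) =====
def Claim_equal_findlastvalues : Prop := ∀ (state : List Int), Dom_findlastvalues state → Spec_findlastvalues state (findlastvalues state)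

-- ===== LEMMAS AND PROOFS =====

-- The two last_e computations agree.
theorem goA_eq (state : List Int) (i : Nat) :
    pvLastElemGoA state i =
      (match (PySem.List.enumerate (state.drop i) (i : Int)).find? (fun p => p.2 == 0) with
        | some p => p.1 - 1
        | none => (state.length : Int) - 1) := by
  suffices H : ∀ (n i : Nat), state.length - i ≤ n →
      pvLastElemGoA state i =
        (match (PySem.List.enumerate (state.drop i) (i : Int)).find? (fun p => p.2 == 0) with
          | some p => p.1 - 1
          | none => (state.length : Int) - 1) from H _ i le_rfl
  intro n
  induction n with
  | zero =>
    intro i hi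
    rw [pvLastElemGoA, dif_neg (by omega), List.drop_eq_nil_of_le (by omega)]
    simp [PySem.List.enumerate]
  | succ n ih =>
    intro i hi
    by_cases h : i < state.length
    · rw [pvLastElemGoA, dif_pos h, ← List.getElem_cons_drop h, PySem.List.enumerate_cons]
      by_cases h0 : state[i] = 0
      · rw [if_pos h0]
        simp [List.find?, h0]
      · rw [if_neg h0, ih (i + 1) (by omega)]
        have hb : (state[i] == (0 : Int)) = false := by simp [h0]
        simp [List.find?, hb]
    · rw [pvLastElemGoA, dif_neg h, List.drop_eq_nil_of_le (by omega)]
      simp [PySem.List.enumerate]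

theorem lastElem_eq (state : List Int) : pvLastElementB state = pvLastElementA state := by
  rw [pvLastElementB, pvLastElementA, goA_eq]
  simp

-- A's loops over the i-list [0..last_e-1] scan indices j = last_e - i, i.e. the descending list.
-- Abstract first-match scans over the j-list:
def pvF1 (state : List Int) (color : Int) : List Int → Int
  | [] => 0
  | j :: rest =>
    if PySem.List.pyGetD state j 0 ≠ -1 ∧ PySem.Int.mod j 2 = color ∧
        PySem.List.pyGetD state j 0 ≠ 13 then j
    else pvF1 state color rest

def pvF2 (state : List Int) (color : Int) : List Int → Int
  | [] => 0
  | j :: rest =>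
    if PySem.List.pyGetD state j 0 ≠ -1 ∧ PySem.Int.mod j 2 ≠ color ∧
        PySem.List.pyGetD state j 0 ≠ 13 then j
    else pvF2 state color rest

theorem loopA1_eq_f1 (state : List Int) (last_e color : Int) (L : List Int) :
    pvLoopA1 state last_e color L = pvF1 state color (L.map (fun i => last_e - i)) := by
  induction L with
  | nil => rfl
  | cons i rest ih => simp [pvLoopA1, pvF1, ih]

theorem loopA2_eq_f2 (state : List Int) (last_e color : Int) (L : List Int) :
    pvLoopA2 state last_e color L = pvF2 state color (L.map (fun i => last_e - i)) := by
  induction L with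
  | nil => rfl
  | cons i rest ih => simp [pvLoopA2, pvF2, ih]

theorem range_map_desc (last_e : Int) :
    (PySem.List.pyRange 0 last_e 1).map (fun i => last_e - i) = PySem.List.pyRange last_e 0 (-1) := by
  rw [PySem.List.pyRange_one, PySem.List.pyRange_neg_one]
  simp [List.map_map, Function.comp_def]

theorem loopB_eq (state : List Int) (color a b : Int) (L : List Int)
    (hL : ∀ j ∈ L, j ≠ 0) :
    pvLoopB state color a b L =
      ((if a = 0 then pvF1 state color L else a), (if b = 0 then pvF2 state color L else b)) := by
  induction L generalizing a b with
  | nil =>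
    simp only [pvLoopB, pvF1, pvF2]
    split_ifs <;> simp_all
  | cons j rest ih =>
    have hj : j ≠ 0 := hL j (by simp)
    have hrest : ∀ x ∈ rest, x ≠ 0 := fun x hx => hL x (by simp [hx])
    by_cases hv : PySem.List.pyGetD state j 0 = -1 ∨ PySem.List.pyGetD state j 0 = 13
    · rw [pvLoopB, if_pos hv, ih _ _ hrest]
      rcases hv with h | h <;> simp [pvF1, pvF2, h]
    · rw [not_or] at hv
      by_cases hp : PySem.Int.mod j 2 = color <;>
        by_cases a0 : a = 0 <;> by_cases b0 : b = 0 <;>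
          simp only [pvLoopB, pvF1, pvF2, hv.1, hv.2, hp, hj, a0, b0, ih _ _ hrest,
            ne_eq, not_false_eq_true, and_self, true_and, and_true, if_true, if_false, not_true] <;>
          simp_all

theorem mem_desc_ne_zero (last_e : Int) : ∀ j ∈ PySem.List.pyRange last_e 0 (-1), j ≠ 0 := by
  intro j hj
  rw [PySem.List.mem_pyRange_neg_one] at hj
  omega

-- ===== VERDICT (by name: the statement is the Claim_ definition above) =====
theorem findlastvalues_spec : Claim_equal_findlastvalues := by
  intro state _
  show findlastvalues state = findlastvalues_alt state
  simp only [findlastvalues, findlastvalues_alt, lastElem_eq, loopA1_eq_f1, loopA2_eq_f2,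
    range_map_desc, loopB_eq state _ 0 0 _ (mem_desc_ne_zero _)]
  simp
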